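-- pv_equiv track=rewrite | github.com/thatoneguy01/mini2 | python/visualize_queues.py | find_active_window
-- ===== SOURCE A (Python) =====
-- def find_active_window(all_data):
--     """Find the time window where the cluster was active (any queue > 0 to all queues = 0)."""
--     # Find first timestamp where any node has queue_size > 0
--     first_active = None
--     for node_data in all_data.values():
--         for timestamp_us, queue_size, _ in node_data:
--             if queue_size > 0:
--                 if first_active is None or timestamp_us < first_active:
--                     first_active = timestamp_us
--
--     if first_active is None:
--         return None, None  # No activity detected
--
--     # Find the last timestamp where all nodes are at 0 (after first_active)
--     last_all_zero = None
--     all_timestamps = set()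
--     for node_data in all_data.values():
--         for timestamp_us, _, _ in node_data:
--             if timestamp_us >= first_active:
--                 all_timestamps.add(timestamp_us)
--
--     for timestamp_us in sorted(all_timestamps, reverse=True):
--         all_zero = True
--         for node_data in all_data.values():
--             # Find the queue size at this timestamp (or closest before it)
--             queue_size = 0
--             for ts, qs, _ in sorted(node_data):
--                 if ts <= timestamp_us:
--                     queue_size = qs
--                 else:
--                     break
--             if queue_size > 0:
--                 all_zero = False
--                 break
--         if all_zero:
--             last_all_zero = timestamp_us
--             break
--
--     if last_all_zero is None:
--         last_all_zero = max(ts for node_data in all_data.values() for ts, _, _ in node_data)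
--
--     return first_active, last_all_zero
-- ===== SOURCE B (Python) =====
-- def find_active_window(all_data):
--     """Find the time window where the cluster was active (any queue > 0 to all queues = 0)."""
--     vals = list(all_data.values())
--     events = [(ts, i, qs, x) for i, nd in enumerate(vals) for ts, qs, x in nd]
--     first_active = min((ts for ts, _, qs, _ in events if qs > 0), default=None)
--     if first_active is None:
--         return None, None
--     # Single ascending sweep over the globally sorted event list, maintaining each node's
--     # current queue value; at the end of each distinct-timestamp group record the timestamp
--     # if it is >= first_active and every node's current value is <= 0.  (Within one node and
--     # timestamp the sort applies the lexicographically largest entry last, matching A.)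
--     events.sort()
--     cur = [0] * len(vals)
--     last_all_zero = None
--     for j, (t, i, qs, _) in enumerate(events):
--         cur[i] = qs
--         if (j + 1 == len(events) or events[j + 1][0] != t) and t >= first_active and all(q <= 0 for q in cur):
--             last_all_zero = t
--     if last_all_zero is None:
--         last_all_zero = events[-1][0]
--     return first_active, last_all_zero
-- ===== Notes on version B (the rewrite author's own statement) =====
-- stated objective: alternative
-- what changed: B replaces A's descending candidate loop that re-sorts and re-scans every node's series at each candidate timestamp with one global sort of all (ts,node,qs) events and a single ascending sweep that maintains each node's current queue value and records the last all-zero distinct timestamp; it trades A's early exit on the first all-zero candidate for a worst-case-better one-pass sweep.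
import Mathlib
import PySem

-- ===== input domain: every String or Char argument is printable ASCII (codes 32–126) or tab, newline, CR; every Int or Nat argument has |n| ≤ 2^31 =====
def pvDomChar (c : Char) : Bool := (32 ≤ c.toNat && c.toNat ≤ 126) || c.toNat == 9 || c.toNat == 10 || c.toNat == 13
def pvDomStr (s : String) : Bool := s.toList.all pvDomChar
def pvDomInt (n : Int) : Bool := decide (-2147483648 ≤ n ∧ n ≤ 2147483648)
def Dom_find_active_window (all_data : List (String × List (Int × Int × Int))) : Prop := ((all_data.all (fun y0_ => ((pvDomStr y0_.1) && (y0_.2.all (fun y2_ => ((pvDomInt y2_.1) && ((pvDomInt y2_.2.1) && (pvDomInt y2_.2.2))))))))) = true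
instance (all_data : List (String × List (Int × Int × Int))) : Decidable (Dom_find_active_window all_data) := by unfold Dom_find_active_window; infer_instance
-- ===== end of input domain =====

-- B replaces A's descending candidate loop (which re-sorts and re-scans every node's series per
-- candidate) with one global sort of (ts, node, qs, extra) events and a single ascending sweep
-- maintaining each node's current queue value. Objective: alternative.


-- ===== PORT A =====
-- Python's sorted(node_data) on triples of ints: lexicographic tuple order = the Lex key below.
def pvKey (e : Int × Int × Int) : Lex (Int × Lex (Int × Int)) := toLex (e.1, toLex (e.2.1, e.2.2))

def pvSortNode (nd : List (Int × Int × Int)) : List (Int × Int × Int) :=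
  PySem.List.sorted nd pvKey false

-- A's inner loop: queue_size = 0; for ts,qs,_ in sorted(nd): if ts <= t: queue_size = qs else: break
def pvScanQ (t : Int) : List (Int × Int × Int) → Int → Int
  | [], acc => acc
  | e :: rest, acc => if e.1 ≤ t then pvScanQ t rest e.2.1 else acc

-- A's per-candidate loop over nodes with break on the first nonzero queue
def pvAllZeroA : List (List (Int × Int × Int)) → Int → Bool
  | [], _ => true
  | nd :: rest, t => if 0 < pvScanQ t (pvSortNode nd) 0 then false else pvAllZeroA rest t

-- A's descending scan with break on the first all-zero timestamp
def pvFindLastA (vals : List (List (Int × Int × Int))) : List Int → Option Int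
  | [] => none
  | t :: rest => if pvAllZeroA vals t then some t else pvFindLastA vals rest

-- 'if first_active is None or timestamp_us < first_active: first_active = timestamp_us'
def pvStepMin (fa : Option Int) (ts : Int) : Option Int :=
  match fa with
  | none => some ts
  | some f => if ts < f then some ts else some f

def pvFirstActiveA (vals : List (List (Int × Int × Int))) : Option Int :=
  vals.foldl (fun fa nd => nd.foldl (fun fa e => if 0 < e.2.1 then pvStepMin fa e.1 else fa) fa) none

-- all_timestamps = set(); nested loops adding ts with ts >= first_active
def pvTssetA (vals : List (List (Int × Int × Int))) (fa : Int) : PySem.Set Int :=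
  vals.foldl (fun s nd => nd.foldl (fun s e => if fa ≤ e.1 then PySem.Set.add s e.1 else s) s)
    PySem.Set.empty

-- max(ts for node_data in all_data.values() for ts,_,_ in node_data)  (A's fallback)
def pvMaxTs (vals : List (List (Int × Int × Int))) : Option Int :=
  PySem.List.max? (vals.flatMap (fun nd => nd.map (fun e => e.1))) (fun x => x)

def find_active_window (all_data : List (String × List (Int × Int × Int))) : Option Int × Option Int :=
  let vals := (PySem.Dict.ofList all_data).values
  match pvFirstActiveA vals with
  | none => (none, none)
  | some fa =>
    match pvFindLastA vals (PySem.List.sorted (pvTssetA vals fa) (fun x => x) true) with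
    | some t => (some fa, some t)
    | none => (some fa, pvMaxTs vals)

-- ===== PORT B =====
-- Python's sort of the 4-tuples (ts, i, qs, x): lexicographic order = the Lex key below.
def pvKey4 (e : Int × Int × Int × Int) : Lex (Int × Lex (Int × Lex (Int × Int))) :=
  toLex (e.1, toLex (e.2.1, toLex (e.2.2.1, e.2.2.2)))

-- [(ts, i, qs, x) for i, nd in enumerate(vals) for ts, qs, x in nd] — hand-port of the
-- enumerate comprehension, carrying the running index i (exact: i = 0, 1, …).
def pvEvents : List (List (Int × Int × Int)) → Int → List (Int × Int × Int × Int)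
  | [], _ => []
  | nd :: rest, i => nd.map (fun e => (e.1, i, e.2.1, e.2.2)) ++ pvEvents rest (i + 1)

-- Source B's sweep loop: cur[i] = qs; at the end of each distinct-timestamp group (lookahead:
-- next event's ts differs or the list ends) record t if t >= fa and all cur values <= 0.
-- cur[i] uses .toNat: every event's index comes from enumerate, so it is >= 0.
def pvSweep (fa : Int) : List (Int × Int × Int × Int) → List Int → Option Int → Option Int
  | [], _, best => best
  | e :: rest, cur, best =>
    let cur' := cur.set e.2.1.toNat e.2.2.1
    let best' :=
      if (rest.head?.all (fun e2 => decide (e2.1 ≠ e.1))) && decide (fa ≤ e.1)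
          && cur'.all (fun q => decide (q ≤ 0)) then some e.1 else best
    pvSweep fa rest cur' best'

def find_active_window_alt (all_data : List (String × List (Int × Int × Int))) : Option Int × Option Int :=
  let vals := (PySem.Dict.ofList all_data).values
  let events := pvEvents vals 0
  match PySem.List.min?
      (events.filterMap (fun e => if 0 < e.2.2.1 then some e.1 else none)) (fun x => x) with
  | none => (none, none)
  | some fa =>
    let es := PySem.List.sorted events pvKey4 false
    match pvSweep fa es (List.replicate vals.length 0) none with
    | some t => (some fa, some t)
    | none => (some fa, (PySem.List.pyGet? es (-1)).map (fun e => e.1))  -- events[-1][0]; es ≠ [] here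

-- ===== PRECONDITION & SPEC =====
def Spec_find_active_window (all_data : List (String × List (Int × Int × Int))) (out : Option Int × Option Int) : Prop := out = find_active_window_alt all_data
instance (all_data : List (String × List (Int × Int × Int))) (out : Option Int × Option Int) : Decidable (Spec_find_active_window all_data out) := by unfold Spec_find_active_window; infer_instance

-- ===== CLAIM (what is proved, stated in full; the proofs are below) =====
def Claim_equal_find_active_window : Prop := ∀ (all_data : List (String × List (Int × Int × Int))), Dom_find_active_window all_data → Spec_find_active_window all_data (find_active_window all_data)

-- ===== LEMMAS AND PROOFS =====

-- abbreviations used only by the proofs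
def pvTsLe (a b : Int × Int × Int × Int) : Prop := a.1 ≤ b.1

def pvSf (c : List Int) (e : Int × Int × Int × Int) : List Int := c.set e.2.1.toNat e.2.2.1

-- checkpoint timestamps of the event list, in encounter (ascending) order
def pvChk : List (Int × Int × Int × Int) → List Int
  | [] => []
  | e :: rest =>
    if rest.head?.all (fun e2 => decide (e2.1 ≠ e.1)) then e.1 :: pvChk rest else pvChk rest

theorem pv_chk_cons (e : Int × Int × Int × Int) (rest : List (Int × Int × Int × Int)) :
    pvChk (e :: rest)
      = if rest.head?.all (fun e2 => decide (e2.1 ≠ e.1)) then e.1 :: pvChk rest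
        else pvChk rest := rfl

-- ---- generic list facts about the two programs ----

theorem pv_foldl_filterMap {a b g : Type} (f : a → Option b) (gg : g → b → g) :
    ∀ (l : List a) (init : g),
      (l.filterMap f).foldl gg init
        = l.foldl (fun acc e => match f e with | some x => gg acc x | none => acc) init := by
  intro l
  induction l with
  | nil => intro init; rfl
  | cons x xs ih => intro init; cases h : f x <;> simp [h, ih]

theorem pv_foldl_flatMap {a b g : Type} (f : a → List b) (gg : g → b → g) :
    ∀ (l : List a) (init : g),
      (l.flatMap f).foldl gg init = l.foldl (fun acc nd => (f nd).foldl gg acc) init := by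
  intro l
  induction l with
  | nil => intro init; rfl
  | cons x xs ih => intro init; simp [List.flatMap_cons, List.foldl_append, ih]

theorem pv_stepMin_some (l : List Int) : ∀ (x : Int), l.foldl pvStepMin (some x) = some (l.foldl min x) := by
  induction l with
  | nil => intro x; rfl
  | cons y ys ih =>
    intro x
    have h : pvStepMin (some x) y = some (min x y) := by
      simp only [pvStepMin, Int.min_def]
      split <;> split <;> simp only [Option.some.injEq] <;> omega
    simp [List.foldl_cons, h, ih]

theorem pv_foldl_stepMin (l : List Int) :
    l.foldl pvStepMin none = PySem.List.min? l (fun x => x) := by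
  cases l with
  | nil => rfl
  | cons x xs =>
    have : pvStepMin none x = some x := rfl
    rw [List.foldl_cons, this, pv_stepMin_some, PySem.List.min?_id_cons]

theorem pv_firstActive_eq (vals : List (List (Int × Int × Int))) :
    pvFirstActiveA vals
      = PySem.List.min?
          (vals.flatMap (fun nd => nd.filterMap (fun e => if 0 < e.2.1 then some e.1 else none)))
          (fun x => x) := by
  rw [← pv_foldl_stepMin, pv_foldl_flatMap]
  unfold pvFirstActiveA
  congr 1
  funext acc nd
  rw [pv_foldl_filterMap]
  congr 1
  funext fa e
  by_cases h : 0 < e.2.1 <;> simp [h]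

theorem pv_tsset_eq (vals : List (List (Int × Int × Int))) (fa : Int) :
    pvTssetA vals fa
      = PySem.Set.ofList
          (vals.flatMap (fun nd => nd.filterMap (fun e => if fa ≤ e.1 then some e.1 else none))) := by
  rw [PySem.Set.ofList_eq_foldl, pv_foldl_flatMap]
  unfold pvTssetA
  congr 1
  funext s nd
  rw [pv_foldl_filterMap]
  congr 1
  funext s e
  by_cases h : fa ≤ e.1 <;> simp [h]

-- ---- pvEvents projections ----

theorem pv_events_filterMap (vals : List (List (Int × Int × Int))) : ∀ (i0 : Int),
    (pvEvents vals i0).filterMap (fun e => if 0 < e.2.2.1 then some e.1 else none)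
      = vals.flatMap (fun nd => nd.filterMap (fun e => if 0 < e.2.1 then some e.1 else none)) := by
  induction vals with
  | nil => intro i0; rfl
  | cons nd rest ih =>
    intro i0
    simp only [pvEvents, List.filterMap_append, List.filterMap_map, List.flatMap_cons, ih]
    rfl

theorem pv_events_map_ts (vals : List (List (Int × Int × Int))) : ∀ (i0 : Int),
    (pvEvents vals i0).map (fun e => e.1) = vals.flatMap (fun nd => nd.map (fun e => e.1)) := by
  induction vals with
  | nil => intro i0; rfl
  | cons nd rest ih =>
    intro i0
    simp only [pvEvents, List.map_append, List.map_map, List.flatMap_cons, ih]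
    rfl

theorem pv_events_idx_lb (vals : List (List (Int × Int × Int))) : ∀ (i0 : Int),
    ∀ ev ∈ pvEvents vals i0, i0 ≤ ev.2.1 := by
  induction vals with
  | nil => intro i0 ev h; simp [pvEvents] at h
  | cons nd rest ih =>
    intro i0 ev h
    rcases List.mem_append.mp h with h1 | h2
    · rcases List.mem_map.mp h1 with ⟨x, _, rfl⟩; simp
    · have := ih (i0 + 1) ev h2; omega

theorem pv_events_idx_ub (vals : List (List (Int × Int × Int))) : ∀ (i0 : Int),
    ∀ ev ∈ pvEvents vals i0, ev.2.1 < i0 + vals.length := by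
  induction vals with
  | nil => intro i0 ev h; simp [pvEvents] at h
  | cons nd rest ih =>
    intro i0 ev h
    rcases List.mem_append.mp h with h1 | h2
    · rcases List.mem_map.mp h1 with ⟨x, _, rfl⟩; simp
    · have := ih (i0 + 1) ev h2; simp at this ⊢; omega

theorem pv_events_filter_idx (vals : List (List (Int × Int × Int))) : ∀ (i0 : Int) (k : Nat)
    (hk : k < vals.length),
    (pvEvents vals i0).filter (fun ev => ev.2.1 == i0 + (k : Int))
      = vals[k].map (fun x => (x.1, i0 + (k : Int), x.2.1, x.2.2)) := by
  induction vals with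
  | nil => intro i0 k hk; simp at hk
  | cons nd rest ih =>
    intro i0 k hk
    simp only [pvEvents, List.filter_append, List.filter_map]
    cases k with
    | zero =>
      simp only [Nat.cast_zero, add_zero, List.getElem_cons_zero]
      have h2 : (pvEvents rest (i0 + 1)).filter (fun ev => ev.2.1 == i0) = [] := by
        rw [List.filter_eq_nil_iff]
        intro ev hev
        have := pv_events_idx_lb rest (i0 + 1) ev hev
        simp only [beq_iff_eq]
        omega
      rw [h2, List.append_nil]
      refine congrArg _ (List.filter_eq_self.mpr ?_)
      intro x _; simp
    | succ k' =>
      have h1 : nd.filter ((fun ev => ev.2.1 == i0 + ((k' + 1 : Nat) : Int)) ∘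
          (fun e => (e.1, i0, e.2.1, e.2.2))) = [] := by
        rw [List.filter_eq_nil_iff]
        intro x _
        simp only [Function.comp, beq_iff_eq]
        push_cast
        omega
      have h2 := ih (i0 + 1) k' (by simpa using hk)
      have hc : i0 + ((k' + 1 : Nat) : Int) = (i0 + 1) + ((k' : Nat) : Int) := by push_cast; ring
      simp only [List.getElem_cons_succ]
      rw [h1, List.map_nil, List.nil_append, hc]
      exact h2

-- ---- the sorted event list restricted to one node ----

theorem pv_sortNode_pairwise (nd : List (Int × Int × Int)) :
    (pvSortNode nd).Pairwise (fun a b => pvKey a ≤ pvKey b) := by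
  exact PySem.List.sorted_pairwise nd pvKey

theorem pv_key4_inj (a b : Int × Int × Int × Int) (h : pvKey4 a = pvKey4 b) : a = b := by
  obtain ⟨a1, a2, a3, a4⟩ := a
  obtain ⟨b1, b2, b3, b4⟩ := b
  simp only [pvKey4, toLex_inj, Prod.mk.injEq] at h
  obtain ⟨h1, h2, h3, h4⟩ := h
  simp [h1, h2, h3, h4]

theorem pv_filter_idx_sorted (vals : List (List (Int × Int × Int))) (k : Nat)
    (hk : k < vals.length) :
    (PySem.List.sorted (pvEvents vals 0) pvKey4 false).filter (fun ev => ev.2.1 == (k : Int))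
      = (pvSortNode vals[k]).map (fun x => (x.1, (k : Int), x.2.1, x.2.2)) := by
  have hmono : ∀ a b : Int × Int × Int, pvKey a ≤ pvKey b →
      pvKey4 (a.1, (k : Int), a.2.1, a.2.2) ≤ pvKey4 (b.1, (k : Int), b.2.1, b.2.2) := by
    intro a b hab
    simp only [pvKey, pvKey4] at *
    rcases Prod.Lex.toLex_le_toLex.mp hab with h1 | ⟨h1, h2⟩
    · exact Prod.Lex.toLex_le_toLex.mpr (Or.inl h1)
    · refine Prod.Lex.toLex_le_toLex.mpr (Or.inr ⟨h1, ?_⟩)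
      refine Prod.Lex.toLex_le_toLex.mpr (Or.inr ⟨rfl, ?_⟩)
      rcases Prod.Lex.toLex_le_toLex.mp h2 with h3 | ⟨h3, h4⟩
      · exact Prod.Lex.toLex_le_toLex.mpr (Or.inl h3)
      · exact Prod.Lex.toLex_le_toLex.mpr (Or.inr ⟨h3, h4⟩)
  have hperm : ((PySem.List.sorted (pvEvents vals 0) pvKey4 false).filter
        (fun ev => ev.2.1 == (k : Int))).Perm
      ((pvSortNode vals[k]).map (fun x => (x.1, (k : Int), x.2.1, x.2.2))) := by
    have hp1 := (PySem.List.sorted_perm (pvEvents vals 0) pvKey4 false).filter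
      (fun ev => ev.2.1 == (k : Int))
    have hf := pv_events_filter_idx vals 0 k hk
    simp only [zero_add] at hf
    rw [hf] at hp1
    have hp2 : (pvSortNode vals[k]).Perm vals[k] := PySem.List.sorted_perm _ _ _
    exact hp1.trans (hp2.map _).symm
  have hs1 : ((PySem.List.sorted (pvEvents vals 0) pvKey4 false).filter
      (fun ev => ev.2.1 == (k : Int))).Pairwise (fun a b => pvKey4 a ≤ pvKey4 b) :=
    (PySem.List.sorted_pairwise (pvEvents vals 0) pvKey4).filter _
  have hs2 : ((pvSortNode vals[k]).map (fun x => (x.1, (k : Int), x.2.1, x.2.2))).Pairwise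
      (fun a b => pvKey4 a ≤ pvKey4 b) := by
    refine List.pairwise_map.mpr ?_
    exact (pv_sortNode_pairwise vals[k]).imp (fun hab => hmono _ _ hab)
  exact hperm.eq_of_pairwise
    (fun a b _ _ h1 h2 => pv_key4_inj a b (le_antisymm h1 h2)) hs1 hs2

-- ---- A's per-node scan as a filter-fold ----

theorem pv_scanQ_filter (t : Int) (l : List (Int × Int × Int))
    (hs : l.Pairwise (fun a b => a.1 ≤ b.1)) :
    ∀ acc, pvScanQ t l acc
      = (l.filter (fun x => decide (x.1 ≤ t))).foldl (fun _ x => x.2.1) acc := by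
  induction l with
  | nil => intro acc; rfl
  | cons e rest ih =>
    intro acc
    have hp := List.pairwise_cons.mp hs
    by_cases h : e.1 ≤ t
    · simp [pvScanQ, h, ih hp.2]
    · have hnil : rest.filter (fun x => decide (x.1 ≤ t)) = [] := by
        rw [List.filter_eq_nil_iff]
        intro x hx
        have := hp.1 x hx
        simp only [decide_eq_true_eq]
        omega
      simp only [pvScanQ, if_neg h, List.filter_cons]
      simp [h, hnil]

theorem pv_allZero_all (vals : List (List (Int × Int × Int))) (t : Int) :
    pvAllZeroA vals t = vals.all (fun nd => decide (pvScanQ t (pvSortNode nd) 0 ≤ 0)) := by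
  induction vals with
  | nil => rfl
  | cons nd rest ih =>
    by_cases h : 0 < pvScanQ t (pvSortNode nd) 0
    · simp [pvAllZeroA, h]
    · simp [pvAllZeroA, h, ih, (by omega : pvScanQ t (pvSortNode nd) 0 ≤ 0)]

-- ---- the sweep's cur array ----

theorem pv_foldl_sf_length (d : List (Int × Int × Int × Int)) : ∀ (c : List Int),
    (d.foldl pvSf c).length = c.length := by
  induction d with
  | nil => intro c; rfl
  | cons e rest ih => intro c; simp [List.foldl_cons, ih, pvSf]

theorem pv_foldl_sf_getD (d : List (Int × Int × Int × Int)) : ∀ (c : List Int) (k : Nat),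
    k < c.length →
    (d.foldl pvSf c).getD k 0
      = d.foldl (fun a ev => if ev.2.1.toNat = k ∧ ev.2.1.toNat < c.length then ev.2.2.1 else a)
          (c.getD k 0) := by
  induction d with
  | nil => intro c k hk; rfl
  | cons e rest ih =>
    intro c k hk
    simp only [List.foldl_cons]
    rw [ih (pvSf c e) k (by simp [pvSf, hk])]
    have hlen : (pvSf c e).length = c.length := by simp [pvSf]
    by_cases hj : e.2.1.toNat = k ∧ e.2.1.toNat < c.length
    · have : (pvSf c e).getD k 0 = e.2.2.1 := by
        obtain ⟨h1, h2⟩ := hj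
        subst h1
        simp [pvSf, List.getD_eq_getElem?_getD, h2]
      rw [this, if_pos hj]
      simp only [hlen]
    · have : (pvSf c e).getD k 0 = c.getD k 0 := by
        simp only [pvSf, List.getD_eq_getElem?_getD]
        by_cases h1 : e.2.1.toNat = k
        · have h2 : ¬ e.2.1.toNat < c.length := fun hh => hj ⟨h1, hh⟩
          rw [List.set_eq_of_length_le (by omega)]
        · rw [List.getElem?_set_ne h1]
      rw [this, if_neg hj]
      simp only [hlen]

-- last-write value of node k = fold over the events of node k
theorem pv_idx_fold_eq_filter (k L : Nat) (d : List (Int × Int × Int × Int))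
    (hok : ∀ ev ∈ d, 0 ≤ ev.2.1 ∧ ev.2.1.toNat < L) : ∀ (x : Int),
    d.foldl (fun a ev => if ev.2.1.toNat = k ∧ ev.2.1.toNat < L then ev.2.2.1 else a) x
      = (d.filter (fun ev => ev.2.1 == (k : Int))).foldl (fun _ ev => ev.2.2.1) x := by
  induction d with
  | nil => intro x; rfl
  | cons e rest ih =>
    intro x
    have he := hok e (by simp)
    have ihr := ih (fun ev hev => hok ev (by simp [hev]))
    by_cases h : e.2.1 = (k : Int)
    · have h1 : e.2.1.toNat = k := by omega
      have h2 : k < L := by omega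
      simp [h, h2, ihr]
    · have h1 : e.2.1.toNat ≠ k := by omega
      simp [h, h1, ihr]

-- cur'.all (<= 0) at a checkpoint equals A's all-nodes-zero test
theorem pv_curzero (vals : List (List (Int × Int × Int)))
    (done : List (Int × Int × Int × Int)) (e : Int × Int × Int × Int)
    (rest : List (Int × Int × Int × Int))
    (hsplit : PySem.List.sorted (pvEvents vals 0) pvKey4 false = done ++ e :: rest)
    (hchk : rest.head?.all (fun e2 => decide (e2.1 ≠ e.1)) = true) :
    (((done ++ [e]).foldl pvSf (List.replicate vals.length 0)).all (fun q => decide (q ≤ 0)))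
      = pvAllZeroA vals e.1 := by
  have hEp : (PySem.List.sorted (pvEvents vals 0) pvKey4 false).Pairwise
      (fun a b => pvKey4 a ≤ pvKey4 b) := PySem.List.sorted_pairwise _ _
  have htsp : (PySem.List.sorted (pvEvents vals 0) pvKey4 false).Pairwise pvTsLe := by
    refine hEp.imp ?_
    intro a b hab
    rcases Prod.Lex.toLex_le_toLex.mp hab with h1 | ⟨h1, _⟩
    · exact le_of_lt h1
    · exact le_of_eq h1
  have hok : ∀ ev ∈ PySem.List.sorted (pvEvents vals 0) pvKey4 false,
      0 ≤ ev.2.1 ∧ ev.2.1.toNat < vals.length := by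
    intro ev hev
    have hev' : ev ∈ pvEvents vals 0 :=
      (PySem.List.sorted_perm (pvEvents vals 0) pvKey4 false).mem_iff.mp hev
    have h1 := pv_events_idx_lb vals 0 ev hev'
    have h2 := pv_events_idx_ub vals 0 ev hev'
    constructor
    · exact h1
    · omega
  rw [hsplit] at htsp hok
  have hde_sub : ∀ ev ∈ done ++ [e], ev ∈ done ++ e :: rest := by
    intro ev hev
    rcases List.mem_append.mp hev with h1 | h2
    · exact List.mem_append.mpr (Or.inl h1)
    · simp at h2; subst h2; exact List.mem_append.mpr (Or.inr (by simp))
  have hokde : ∀ ev ∈ done ++ [e], 0 ≤ ev.2.1 ∧ ev.2.1.toNat < vals.length :=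
    fun ev hev => hok ev (hde_sub ev hev)
  have hpa := List.pairwise_append.mp htsp
  have hpc := List.pairwise_cons.mp hpa.2.1
  have hle : ∀ a ∈ done ++ [e], a.1 ≤ e.1 := by
    intro a ha
    rcases List.mem_append.mp ha with h1 | h2
    · exact hpa.2.2 a h1 e (by simp)
    · simp at h2; subst h2; exact le_refl _
  have hgt : ∀ b ∈ rest, e.1 < b.1 := by
    intro b hb
    cases hr : rest with
    | nil => subst hr; simp at hb
    | cons e2 r' =>
      subst hr
      have hne : e2.1 ≠ e.1 := by simpa using hchk
      have hle2 : e.1 ≤ e2.1 := hpc.1 e2 (by simp)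
      rcases List.mem_cons.mp hb with rfl | hb'
      · omega
      · have h3 : e2.1 ≤ b.1 := (List.pairwise_cons.mp hpc.2).1 b hb'
        omega
  -- per-index value of the cur array at the checkpoint
  have hlen : ((done ++ [e]).foldl pvSf (List.replicate vals.length 0)).length = vals.length := by
    rw [pv_foldl_sf_length]; simp
  have hkey : ∀ (k : Nat) (hk : k < vals.length),
      ((done ++ [e]).foldl pvSf (List.replicate vals.length 0)).getD k 0
        = pvScanQ e.1 (pvSortNode vals[k]) 0 := by
    intro k hk
    rw [pv_foldl_sf_getD _ _ _ (by simpa using hk)]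
    have hrep : (List.replicate vals.length (0 : Int)).getD k 0 = 0 := by
      simp [List.getD_eq_getElem?_getD, hk]
    rw [hrep]
    simp only [List.length_replicate]
    rw [pv_idx_fold_eq_filter k vals.length _ hokde]
    -- the events of node k up to the checkpoint = node k's sorted series filtered to ts <= e.1
    have hsplit2 : PySem.List.sorted (pvEvents vals 0) pvKey4 false
        = (done ++ [e]) ++ rest := by rw [hsplit]; simp
    have hfil : (done ++ [e]).filter (fun ev => ev.2.1 == (k : Int))
        = ((PySem.List.sorted (pvEvents vals 0) pvKey4 false).filter
            (fun ev => ev.2.1 == (k : Int))).filter (fun ev => decide (ev.1 ≤ e.1)) := by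
      have hEsplit : (PySem.List.sorted (pvEvents vals 0) pvKey4 false).filter
          (fun ev => ev.2.1 == (k : Int))
          = (done ++ [e]).filter (fun ev => ev.2.1 == (k : Int))
            ++ rest.filter (fun ev => ev.2.1 == (k : Int)) := by
        rw [hsplit2, List.filter_append]
      have h1 : (((done ++ [e]).filter (fun ev => ev.2.1 == (k : Int))).filter
          (fun ev => decide (ev.1 ≤ e.1))) = (done ++ [e]).filter (fun ev => ev.2.1 == (k : Int)) := by
        apply List.filter_eq_self.mpr
        intro x hx
        have := hle x (List.mem_of_mem_filter hx)
        simpa using this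
      have h2 : ((rest.filter (fun ev => ev.2.1 == (k : Int))).filter
          (fun ev => decide (ev.1 ≤ e.1))) = [] := by
        rw [List.filter_eq_nil_iff]
        intro x hx
        have := hgt x (List.mem_of_mem_filter hx)
        simp
        omega
      conv_rhs => rw [hEsplit, List.filter_append, h1, h2]
      rw [List.append_nil]
    rw [hfil, pv_filter_idx_sorted vals k hk, List.filter_map, List.foldl_map]
    have hts : (pvSortNode vals[k]).Pairwise (fun a b => a.1 ≤ b.1) := by
      refine (pv_sortNode_pairwise vals[k]).imp ?_
      intro a b hab
      rcases Prod.Lex.toLex_le_toLex.mp hab with h1 | ⟨h1, _⟩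
      · exact le_of_lt h1
      · exact le_of_eq h1
    rw [pv_scanQ_filter e.1 _ hts 0]
    rfl
  -- both all-tests say: every node's queue at e.1 is <= 0
  rw [pv_allZero_all]
  refine Bool.eq_iff_iff.mpr ?_
  simp only [List.all_eq_true, decide_eq_true_eq]
  constructor
  · intro h nd hnd
    obtain ⟨k, hk, rfl⟩ := List.mem_iff_getElem.mp hnd
    rw [← hkey k hk]
    refine h _ ?_
    rw [List.getD_eq_getElem _ _ (by omega)]
    exact List.getElem_mem _
  · intro h q hq
    obtain ⟨k, hk, rfl⟩ := List.mem_iff_getElem.mp hq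
    have hk' : k < vals.length := by omega
    rw [show (((done ++ [e]).foldl pvSf (List.replicate vals.length 0))[k] : Int)
        = ((done ++ [e]).foldl pvSf (List.replicate vals.length 0)).getD k 0 from
      (List.getD_eq_getElem _ _ hk).symm, hkey k hk']
    exact h _ (List.getElem_mem hk')

-- ---- the sweep as a reverse find? over checkpoints ----

theorem pv_sweep_inv (vals : List (List (Int × Int × Int))) (fa : Int) :
    ∀ (rest done : List (Int × Int × Int × Int)) (best : Option Int),
      PySem.List.sorted (pvEvents vals 0) pvKey4 false = done ++ rest →
      pvSweep fa rest (done.foldl pvSf (List.replicate vals.length 0)) best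
        = match (pvChk rest).reverse.find?
              (fun t => decide (fa ≤ t) && pvAllZeroA vals t) with
          | some t => some t
          | none => best := by
  intro rest
  induction rest with
  | nil => intro done best h; rfl
  | cons e rest ih =>
    intro done best hsplit
    have hstep : (done.foldl pvSf (List.replicate vals.length 0)).set e.2.1.toNat e.2.2.1
        = (done ++ [e]).foldl pvSf (List.replicate vals.length 0) := by
      rw [List.foldl_append]; rfl
    have hsplit' : PySem.List.sorted (pvEvents vals 0) pvKey4 false = (done ++ [e]) ++ rest := by
      rw [hsplit]; simp
    rw [pvSweep]
    simp only [hstep]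
    cases hc : rest.head?.all (fun e2 => decide (e2.1 ≠ e.1)) with
    | false =>
      simp only [Bool.false_and, Bool.false_eq_true, if_false]
      rw [ih (done ++ [e]) best hsplit']
      simp only [pvChk, hc]
      rfl
    | true =>
      have hz := pv_curzero vals done e rest hsplit hc
      rw [hz, ih (done ++ [e]) _ hsplit']
      simp only [pvChk, hc, if_true, List.reverse_cons, List.find?_append]
      cases hf : (pvChk rest).reverse.find? (fun t => decide (fa ≤ t) && pvAllZeroA vals t) with
      | some t => simp
      | none =>
        cases hq : decide (fa ≤ e.1) && pvAllZeroA vals e.1 with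
        | true => simp [List.find?, hq]
        | false => simp [List.find?, hq]

-- ---- checkpoints: membership and strict ascent ----

theorem pv_chk_mem (l : List (Int × Int × Int × Int)) :
    ∀ t, t ∈ pvChk l ↔ t ∈ l.map (fun e => e.1) := by
  induction l with
  | nil => intro t; simp [pvChk]
  | cons e rest ih =>
    intro t
    cases hr : rest with
    | nil => subst hr; simp [pvChk]
    | cons e2 r' =>
      subst hr
      by_cases h : e2.1 ≠ e.1
      · have hc : ((e2 :: r').head?.all (fun x => decide (x.1 ≠ e.1))) = true := by simp [h]
        rw [pv_chk_cons, if_pos hc]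
        simp only [List.mem_cons, ih, List.map_cons]
      · have h : e2.1 = e.1 := not_ne_iff.mp h
        have hc : ((e2 :: r').head?.all (fun x => decide (x.1 ≠ e.1))) = false := by simp [h]
        rw [pv_chk_cons, if_neg (by simp [h])]
        rw [ih]
        simp only [List.map_cons, List.mem_cons]
        rw [h]
        tauto

theorem pv_chk_pairwise (l : List (Int × Int × Int × Int))
    (hs : l.Pairwise pvTsLe) : (pvChk l).Pairwise (· < ·) := by
  induction l with
  | nil => simp [pvChk]
  | cons e rest ih =>
    have hp := List.pairwise_cons.mp hs
    cases hc : rest.head?.all (fun e2 => decide (e2.1 ≠ e.1)) with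
    | false =>
      simp only [pvChk, hc, Bool.false_eq_true, if_false]
      exact ih hp.2
    | true =>
      simp only [pvChk, hc, if_true]
      refine List.pairwise_cons.mpr ⟨?_, ih hp.2⟩
      intro t ht
      rcases List.mem_map.mp ((pv_chk_mem rest t).mp ht) with ⟨b, hb, rfl⟩
      cases hr : rest with
      | nil => subst hr; simp at hb
      | cons e2 r' =>
        subst hr
        have hne : e2.1 ≠ e.1 := by simpa using hc
        have hle2 : e.1 ≤ e2.1 := hp.1 e2 (by simp)
        rcases List.mem_cons.mp hb with rfl | hb'
        · omega
        · have h3 : e2.1 ≤ b.1 := (List.pairwise_cons.mp hp.2).1 b hb'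
          omega

-- ---- A's search loop is find? ----

theorem pv_findLast_find? (vals : List (List (Int × Int × Int))) (l : List Int) :
    pvFindLastA vals l = l.find? (fun t => pvAllZeroA vals t) := by
  induction l with
  | nil => rfl
  | cons t rest ih =>
    rw [List.find?_cons]
    by_cases h : pvAllZeroA vals t
    · simp [pvFindLastA, h]
    · simp only [pvFindLastA, ih]
      simp [h]

-- A's descending candidate list = reversed checkpoints filtered by fa <= t
theorem pv_cand_eq (vals : List (List (Int × Int × Int))) (fa : Int) :
    PySem.List.sorted (pvTssetA vals fa) (fun x => x) true
      = ((pvChk (PySem.List.sorted (pvEvents vals 0) pvKey4 false)).reverse).filter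
          (fun t => decide (fa ≤ t)) := by
  have htsp : (PySem.List.sorted (pvEvents vals 0) pvKey4 false).Pairwise pvTsLe := by
    refine (PySem.List.sorted_pairwise (pvEvents vals 0) pvKey4).imp ?_
    intro a b hab
    rcases Prod.Lex.toLex_le_toLex.mp hab with h1 | ⟨h1, _⟩
    · exact le_of_lt h1
    · exact le_of_eq h1
  have hchkpw := pv_chk_pairwise _ htsp
  have hys_pw : (((pvChk (PySem.List.sorted (pvEvents vals 0) pvKey4 false)).reverse).filter
      (fun t => decide (fa ≤ t))).Pairwise (fun a b => b < a) :=
    (List.pairwise_reverse.mpr hchkpw).filter _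
  have hys_nodup : (((pvChk (PySem.List.sorted (pvEvents vals 0) pvKey4 false)).reverse).filter
      (fun t => decide (fa ≤ t))).Nodup :=
    (List.nodup_reverse.mpr (hchkpw.imp (fun h => ne_of_lt h))).filter _
  have hxs_nodup : (pvTssetA vals fa).Nodup := by
    rw [pv_tsset_eq]
    exact PySem.Set.nodup_ofList _
  have hmem : ∀ t, (t ∈ ((pvChk (PySem.List.sorted (pvEvents vals 0) pvKey4 false)).reverse).filter
      (fun t => decide (fa ≤ t))) ↔ t ∈ pvTssetA vals fa := by
    intro t
    rw [List.mem_filter, List.mem_reverse, pv_chk_mem, pv_tsset_eq, PySem.Set.mem_ofList]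
    have hEmap : (t ∈ (PySem.List.sorted (pvEvents vals 0) pvKey4 false).map (fun e => e.1))
        ↔ t ∈ vals.flatMap (fun nd => nd.map (fun e => e.1)) := by
      rw [← pv_events_map_ts vals 0]
      exact ((PySem.List.sorted_perm (pvEvents vals 0) pvKey4 false).map _).mem_iff
    rw [hEmap]
    simp only [List.mem_flatMap, List.mem_filterMap, List.mem_map, decide_eq_true_eq]
    constructor
    · rintro ⟨⟨nd, hnd, x, hx, rfl⟩, hfa⟩
      exact ⟨nd, hnd, x, hx, by simp [hfa]⟩
    · rintro ⟨nd, hnd, x, hx, hsome⟩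
      by_cases hfa : fa ≤ x.1
      · simp only [if_pos hfa, Option.some.injEq] at hsome
        subst hsome
        exact ⟨⟨nd, hnd, x, hx, rfl⟩, hfa⟩
      · simp [hfa] at hsome
  have hperm : (((pvChk (PySem.List.sorted (pvEvents vals 0) pvKey4 false)).reverse).filter
      (fun t => decide (fa ≤ t))).Perm (pvTssetA vals fa) :=
    (List.perm_ext_iff_of_nodup hys_nodup hxs_nodup).mpr hmem
  exact PySem.List.sorted_rev_eq_of_perm_of_pairwise_gt _ _ (fun x => x) hperm hys_pw

-- find? with a conjunction = find? over the filtered list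
theorem pv_find?_filter {a : Type} (p q : a → Bool) (l : List a) :
    (l.filter p).find? q = l.find? (fun x => p x && q x) := by
  induction l with
  | nil => rfl
  | cons x l ih =>
    cases hp : p x <;> cases hq : q x <;>
      simp [hp, hq, ih]

-- ---- fallback: max ts = last event of the sorted list ----

theorem pv_getLast_ts_max (l : List (Int × Int × Int × Int)) (hs : l.Pairwise pvTsLe)
    (h : l ≠ []) : ∀ x ∈ l, x.1 ≤ (l.getLast h).1 := by
  induction l with
  | nil => simp at h
  | cons e rest ih =>
    have hp := List.pairwise_cons.mp hs
    intro x hx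
    cases rest with
    | nil =>
      simp at hx
      subst hx
      simp
    | cons e2 r' =>
      rw [List.getLast_cons (by simp)]
      rcases List.mem_cons.mp hx with rfl | hx'
      · have hm : (e2 :: r').getLast (by simp) ∈ (e2 :: r') := List.getLast_mem _
        exact hp.1 _ hm
      · exact ih hp.2 (by simp) x hx'


theorem pv_fallback_eq (vals : List (List (Int × Int × Int)))
    (hne : pvEvents vals 0 ≠ []) :
    pvMaxTs vals
      = (PySem.List.pyGet? (PySem.List.sorted (pvEvents vals 0) pvKey4 false) (-1)).map
          (fun e => e.1) := by
  have hEne : PySem.List.sorted (pvEvents vals 0) pvKey4 false ≠ [] := by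
    intro hnil
    exact hne ((PySem.List.sorted_eq_nil_iff (pvEvents vals 0) pvKey4 false).mp hnil)
  have htsp : (PySem.List.sorted (pvEvents vals 0) pvKey4 false).Pairwise pvTsLe := by
    refine (PySem.List.sorted_pairwise (pvEvents vals 0) pvKey4).imp ?_
    intro a b hab
    rcases Prod.Lex.toLex_le_toLex.mp hab with h1 | ⟨h1, _⟩
    · exact le_of_lt h1
    · exact le_of_eq h1
  rw [PySem.List.pyGet?_neg_one, List.getLast?_eq_some_getLast hEne, Option.map_some]
  unfold pvMaxTs
  rw [← pv_events_map_ts vals 0]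
  have hLne : (pvEvents vals 0).map (fun e => e.1) ≠ [] := by
    simpa using hne
  cases hm : PySem.List.max? ((pvEvents vals 0).map (fun e => e.1)) (fun x => x) with
  | none =>
    exact absurd ((PySem.List.max?_eq_none_iff _ _).mp hm) hLne
  | some m =>
    have hmem := PySem.List.max?_mem hm
    have hmax := PySem.List.max?_isMax hm
    have hpm : ((PySem.List.sorted (pvEvents vals 0) pvKey4 false).map (fun e => e.1)).Perm
        ((pvEvents vals 0).map (fun e => e.1)) :=
      (PySem.List.sorted_perm (pvEvents vals 0) pvKey4 false).map _
    have h2 : ((PySem.List.sorted (pvEvents vals 0) pvKey4 false).getLast hEne).1 ≤ m := by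
      refine hmax _ ?_
      exact hpm.mem_iff.mp (List.mem_map.mpr ⟨_, List.getLast_mem hEne, rfl⟩)
    have h1 : m ≤ ((PySem.List.sorted (pvEvents vals 0) pvKey4 false).getLast hEne).1 := by
      have hm' : m ∈ (PySem.List.sorted (pvEvents vals 0) pvKey4 false).map (fun e => e.1) :=
        hpm.mem_iff.mpr hmem
      rcases List.mem_map.mp hm' with ⟨x, hx, rfl⟩
      exact pv_getLast_ts_max _ htsp hEne x hx
    have : m = ((PySem.List.sorted (pvEvents vals 0) pvKey4 false).getLast hEne).1 :=
      le_antisymm h1 h2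
    rw [this]

-- ===== VERDICT (by name: the statement is the Claim_ definition above) =====
theorem find_active_window_spec : Claim_equal_find_active_window := by
  intro all_data _
  unfold Spec_find_active_window find_active_window find_active_window_alt
  dsimp only
  rw [pv_firstActive_eq, ← pv_events_filterMap ((PySem.Dict.ofList all_data).values) 0]
  cases h : PySem.List.min?
      ((pvEvents ((PySem.Dict.ofList all_data).values) 0).filterMap
        (fun e => if 0 < e.2.2.1 then some e.1 else none)) (fun x => x) with
  | none => rfl
  | some fa =>
    dsimp only
    have h1 := pv_sweep_inv ((PySem.Dict.ofList all_data).values) fa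
      (PySem.List.sorted (pvEvents ((PySem.Dict.ofList all_data).values) 0) pvKey4 false)
      [] none rfl
    simp only [List.foldl_nil] at h1
    rw [h1, pv_findLast_find?, pv_cand_eq, pv_find?_filter]
    cases hf : ((pvChk (PySem.List.sorted
        (pvEvents ((PySem.Dict.ofList all_data).values) 0) pvKey4 false)).reverse).find?
        (fun t => decide (fa ≤ t) && pvAllZeroA ((PySem.Dict.ofList all_data).values) t) with
    | some t => rfl
    | none =>
      dsimp only
      have hne : pvEvents ((PySem.Dict.ofList all_data).values) 0 ≠ [] := by
        intro h0
        have hm := PySem.List.min?_mem h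
        rw [h0] at hm
        simp at hm
      rw [pv_fallback_eq _ hne]
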